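-- pv_equiv track=rewrite | github.com/Albertree/SOAR-ARC-test | procedural_memory/base_rules/_primitives.py | invert_bordered_rect
-- ===== SOURCE A (Python) =====
-- def invert_bordered_rect(grid, bg=0):
--     """Find a bordered rectangle (frame of color A, interior of color B) on bg grid.
--     Return the rectangle cropped out with border and fill colors swapped.
--     Frame becomes B, interior becomes A."""
--     h = len(grid)
--     w = len(grid[0]) if grid else 0
--
--     # Find all non-bg cells to locate the rectangle
--     non_bg = set()
--     for r in range(h):
--         for c in range(w):
--             if grid[r][c] != bg:
--                 non_bg.add((r, c))
--     if not non_bg: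
--         return None
--
--     min_r = min(p[0] for p in non_bg)
--     max_r = max(p[0] for p in non_bg)
--     min_c = min(p[1] for p in non_bg)
--     max_c = max(p[1] for p in non_bg)
--
--     rect_h = max_r - min_r + 1
--     rect_w = max_c - min_c + 1
--
--     # Extract the rectangle region
--     rect = [grid[min_r + r][min_c:min_c + rect_w] for r in range(rect_h)]
--
--     # Identify border color (top-left corner) and fill color (center)
--     border_color = rect[0][0]
--     # Find the interior color: first non-border color in interior cells
--     fill_color = None
--     for r in range(1, rect_h - 1):
--         for c in range(1, rect_w - 1):
--             if rect[r][c] != border_color: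
--                 fill_color = rect[r][c]
--                 break
--         if fill_color is not None:
--             break
--
--     if fill_color is None:
--         return None
--
--     # Build output with swapped colors
--     output = []
--     for r in range(rect_h):
--         row = []
--         for c in range(rect_w):
--             if rect[r][c] == border_color:
--                 row.append(fill_color)
--             elif rect[r][c] == fill_color:
--                 row.append(border_color)
--             else:
--                 row.append(rect[r][c])
--         output.append(row)
--
--     return output
-- ===== SOURCE B (Python) =====
-- def invert_bordered_rect(grid, bg=0):
--     """Structural trim: normalize rows to the first row's width, strip all-bg
--     edge rows, then strip all-bg edge columns from the column-major view and
--     rebuild — no coordinate set, no min/max arithmetic."""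
--     w = len(grid[0]) if grid else 0
--     rows = [row[:w] for row in grid]
--
--     def blank(line):
--         return all(v == bg for v in line)
--
--     def trim(g):
--         while g and blank(g[0]):
--             g = g[1:]
--         while g and blank(g[-1]):
--             g = g[:-1]
--         return g
--
--     band = trim(rows)
--     if not band:
--         return None
--     cols = trim([[row[c] for row in band] for c in range(w)])
--     rect = [[col[r] for col in cols] for r in range(len(band))]
--
--     border = rect[0][0]
--     fill = next((v for row in rect[1:-1] for v in row[1:-1] if v != border),
--                 None)
--     if fill is None:
--         return None
--     swap = {border: fill, fill: border}
--     return [[swap.get(v, v) for v in row] for row in rect]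
-- ===== Notes on version B (the rewrite author's own statement) =====
-- stated objective: faster
-- what changed: Replaces A's coordinate set of all non-bg cells, the four min/max generator reductions and index-arithmetic cropping by structural trimming: rows are normalized to the first row's width, all-bg edge rows are stripped from both ends, then all-bg edge columns are stripped from the column-major view and the rectangle is rebuilt from it; the three-way swap branch becomes a 2-entry swap dict.
import Mathlib
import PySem

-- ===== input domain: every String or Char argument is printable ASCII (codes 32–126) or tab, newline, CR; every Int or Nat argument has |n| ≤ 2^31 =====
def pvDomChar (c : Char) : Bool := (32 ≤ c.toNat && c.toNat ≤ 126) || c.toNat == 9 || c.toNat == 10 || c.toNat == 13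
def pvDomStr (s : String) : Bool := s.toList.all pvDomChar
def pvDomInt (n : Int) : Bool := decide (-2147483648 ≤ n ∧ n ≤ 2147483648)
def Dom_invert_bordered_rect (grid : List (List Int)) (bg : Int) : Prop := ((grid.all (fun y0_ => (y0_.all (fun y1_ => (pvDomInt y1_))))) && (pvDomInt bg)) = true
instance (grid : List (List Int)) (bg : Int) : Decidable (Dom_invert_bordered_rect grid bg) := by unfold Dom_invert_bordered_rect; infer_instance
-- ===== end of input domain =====

-- B replaces A's coordinate set + four min/max reductions + index cropping by structural
-- trimming: normalize rows to the first row's width, strip all-bg edge rows, strip all-bg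
-- edge columns from the column-major view and rebuild (same asymptotics; measured
-- constant-factor speedup in a timing run; no argument is mutated).

-- ===== PORT A =====
-- A-side helpers: one def per loop of A, used in A's let-chain below.
def invA_nonbg (grid : List (List Int)) (bg h w : Int) : PySem.Set (Int × Int) :=
  (PySem.List.pyRange 0 h 1).foldl (fun s r =>
    (PySem.List.pyRange 0 w 1).foldl (fun s c =>
      if PySem.List.pyGetD (PySem.List.pyGetD grid r []) c 0 ≠ bg
      then PySem.Set.add s (r, c) else s) s)
    PySem.Set.empty

def invA_rect (grid : List (List Int)) (min_r min_c rect_h rect_w : Int) : List (List Int) :=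
  (PySem.List.pyRange 0 rect_h 1).map (fun r =>
    PySem.List.slice (PySem.List.pyGetD grid (min_r + r) []) (some min_c) (some (min_c + rect_w)))

def invA_fill (rect : List (List Int)) (rect_h rect_w border : Int) : Option Int :=
  (PySem.List.pyRange 1 (rect_h - 1) 1).foldl (fun acc r =>
    if acc.isSome then acc
    else (PySem.List.pyRange 1 (rect_w - 1) 1).foldl (fun acc2 c =>
      if acc2.isSome then acc2
      else if PySem.List.pyGetD (PySem.List.pyGetD rect r []) c 0 ≠ border
        then some (PySem.List.pyGetD (PySem.List.pyGetD rect r []) c 0) else none) none) none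

def invA_out (rect : List (List Int)) (rect_h rect_w border fill : Int) : List (List Int) :=
  (PySem.List.pyRange 0 rect_h 1).foldl (fun out r =>
    out ++ [(PySem.List.pyRange 0 rect_w 1).foldl (fun row c =>
      row ++ [if PySem.List.pyGetD (PySem.List.pyGetD rect r []) c 0 = border then fill
        else if PySem.List.pyGetD (PySem.List.pyGetD rect r []) c 0 = fill then border
        else PySem.List.pyGetD (PySem.List.pyGetD rect r []) c 0]) []]) []

def invert_bordered_rect (grid : List (List Int)) (bg : Int) : Option (List (List Int)) :=
  let h : Int := PySem.List.len grid
  let w : Int := if grid.isEmpty then 0 else PySem.List.len (grid.headD [])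
  let non_bg := invA_nonbg grid bg h w
  if non_bg.isEmpty then none
  else
    let min_r := (PySem.List.min? (non_bg.map (·.1)) (fun x => x)).getD 0
    let max_r := (PySem.List.max? (non_bg.map (·.1)) (fun x => x)).getD 0
    let min_c := (PySem.List.min? (non_bg.map (·.2)) (fun x => x)).getD 0
    let max_c := (PySem.List.max? (non_bg.map (·.2)) (fun x => x)).getD 0
    let rect_h := max_r - min_r + 1
    let rect_w := max_c - min_c + 1
    let rect := invA_rect grid min_r min_c rect_h rect_w
    let border := PySem.List.pyGetD (PySem.List.pyGetD rect 0 []) 0 0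
    match invA_fill rect rect_h rect_w border with
    | none => none
    | some fill => some (invA_out rect rect_h rect_w border fill)

-- ===== PORT B =====
-- B-side helpers: blank = Source B's `blank`, pvTrim = Source B's `trim` (the front while-loop is
-- dropWhile; the back while-loop strips the reversed list), invB_fill = the `next(...)` search.
def pvBlank (bg : Int) (line : List Int) : Bool := line.all (fun v => v == bg)

def pvTrim (bg : Int) (g : List (List Int)) : List (List Int) :=
  ((g.dropWhile (pvBlank bg)).reverse.dropWhile (pvBlank bg)).reverse

def invB_fill (rect : List (List Int)) (border : Int) : Option Int :=
  ((PySem.List.slice rect (some 1) (some (-1))).flatMap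
    (fun row => PySem.List.slice row (some 1) (some (-1)))).find? (fun v => v != border)

def invert_bordered_rect_alt (grid : List (List Int)) (bg : Int) : Option (List (List Int)) :=
  let w : Int := if grid.isEmpty then 0 else PySem.List.len (grid.headD [])
  let rows := grid.map (fun row => PySem.List.slice row none (some w))
  let band := pvTrim bg rows
  if band.isEmpty then none
  else
    let cols := pvTrim bg ((PySem.List.pyRange 0 w 1).map (fun c =>
      band.map (fun row => PySem.List.pyGetD row c 0)))
    let rect := (PySem.List.pyRange 0 (PySem.List.len band) 1).map (fun r =>
      cols.map (fun col => PySem.List.pyGetD col r 0))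
    let border := PySem.List.pyGetD (PySem.List.pyGetD rect 0 []) 0 0
    match invB_fill rect border with
    | none => none
    | some fill =>
      let swap : PySem.Dict Int Int :=
        PySem.Dict.insert (PySem.Dict.insert PySem.Dict.empty border fill) fill border
      some (rect.map (fun row => row.map (fun v => PySem.Dict.getD swap v v)))

-- ===== PRECONDITION & SPEC =====
-- Pre_ excludes exactly the jagged grids on which A raises IndexError: some row shorter
-- than the first row (A indexes grid[r][c] for every c below the first row's width in
-- every row r).
def Pre_invert_bordered_rect (grid : List (List Int)) (bg : Int) : Prop :=
  ∀ row ∈ grid, (grid.headD []).length ≤ row.length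
instance (grid : List (List Int)) (bg : Int) : Decidable (Pre_invert_bordered_rect grid bg) := by
  unfold Pre_invert_bordered_rect; infer_instance

def pvWitness_invert_bordered_rect : List (List Int) × Int :=
  ([[1, 1, 1], [1, 2, 1], [1, 1, 1]], 0)

def Spec_invert_bordered_rect (grid : List (List Int)) (bg : Int) (out : Option (List (List Int))) : Prop := out = invert_bordered_rect_alt grid bg
instance (grid : List (List Int)) (bg : Int) (out : Option (List (List Int))) : Decidable (Spec_invert_bordered_rect grid bg out) := by unfold Spec_invert_bordered_rect; infer_instance

-- ===== CLAIM (what is proved, stated in full; the proofs are below) =====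
def Claim_equal_invert_bordered_rect : Prop := ∀ (grid : List (List Int)) (bg : Int), Dom_invert_bordered_rect grid bg → Pre_invert_bordered_rect grid bg → Spec_invert_bordered_rect grid bg (invert_bordered_rect grid bg)

-- ===== LEMMAS AND PROOFS =====

-- A cell of the grid that A's scan records: in range and not background.
def pvHit (grid : List (List Int)) (bg : Int) (r c : Int) : Prop :=
  0 ≤ r ∧ r < grid.length ∧ 0 ≤ c ∧ c < (grid.headD []).length ∧
    PySem.List.pyGetD (PySem.List.pyGetD grid r []) c 0 ≠ bg

lemma pv_mem_foldl_of_step {α β : Type} (l : List β) (f : List α → β → List α) (P : β → α → Prop)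
    (hf : ∀ s c x, x ∈ f s c ↔ x ∈ s ∨ P c x) (s : List α) (x : α) :
    x ∈ l.foldl f s ↔ x ∈ s ∨ ∃ c ∈ l, P c x := by
  induction l generalizing s with
  | nil => simp
  | cons c t ih => rw [List.foldl_cons, ih, hf]; constructor <;> (rintro (h | h) <;> simp_all) <;> tauto

lemma pv_mem_nonbg (grid : List (List Int)) (bg : Int) (x : Int × Int) :
    x ∈ invA_nonbg grid bg (grid.length : Int) ((grid.headD []).length : Int) ↔
      pvHit grid bg x.1 x.2 := by
  unfold invA_nonbg
  have hinner : ∀ (s : List (Int × Int)) (r : Int) (x : Int × Int),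
      x ∈ (PySem.List.pyRange 0 ((grid.headD []).length : Int) 1).foldl
        (fun s c => if PySem.List.pyGetD (PySem.List.pyGetD grid r []) c 0 ≠ bg
           then PySem.Set.add s (r, c) else s) s ↔
      x ∈ s ∨ ∃ c ∈ PySem.List.pyRange 0 ((grid.headD []).length : Int) 1,
        PySem.List.pyGetD (PySem.List.pyGetD grid r []) c 0 ≠ bg ∧ x = (r, c) := by
    intro s r x
    refine pv_mem_foldl_of_step _ _
      (fun c x => PySem.List.pyGetD (PySem.List.pyGetD grid r []) c 0 ≠ bg ∧ x = (r, c)) ?_ s x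
    intro s' c x'
    split_ifs with hq
    · rw [PySem.Set.mem_add]; tauto
    · simp [hq]
  rw [pv_mem_foldl_of_step _ _
      (fun r x => ∃ c ∈ PySem.List.pyRange 0 ((grid.headD []).length : Int) 1,
        PySem.List.pyGetD (PySem.List.pyGetD grid r []) c 0 ≠ bg ∧ x = (r, c))
      (fun s r x => hinner s r x) _ x]
  obtain ⟨a, b⟩ := x
  simp only [PySem.Set.empty, List.not_mem_nil, false_or, PySem.List.mem_pyRange_one, pvHit]
  constructor
  · rintro ⟨r, ⟨hr0, hrH⟩, c, ⟨hc0, hcW⟩, hne, heq⟩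
    injection heq with h1 h2; subst h1; subst h2
    exact ⟨hr0, hrH, hc0, hcW, hne⟩
  · rintro ⟨ha0, haH, hb0, hbW, hne⟩
    exact ⟨a, ⟨ha0, haH⟩, b, ⟨hb0, hbW⟩, hne, rfl⟩

-- pvHit in terms of natural indices (under Pre_).
lemma pv_hit_iff (grid : List (List Int)) (bg : Int)
    (hpre : ∀ row ∈ grid, (grid.headD []).length ≤ row.length) (r c : Int) :
    pvHit grid bg r c ↔ ∃ (i j : Nat) (hi : i < grid.length) (hj : j < (grid.headD []).length),
      r = (i : Int) ∧ c = (j : Int) ∧ grid[i][j]'(by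
        exact lt_of_lt_of_le hj (hpre _ (List.getElem_mem hi))) ≠ bg := by
  constructor
  · rintro ⟨hr0, hrH, hc0, hcW, hne⟩
    have hi : r.toNat < grid.length := by omega
    have hj : c.toNat < (grid.headD []).length := by omega
    refine ⟨r.toNat, c.toNat, hi, hj, by omega, by omega, ?_⟩
    have hrow : PySem.List.pyGetD grid r [] = grid[r.toNat] :=
      PySem.List.pyGetD_eq_getElem _ _ hr0 (by simpa using hrH)
    have hlen : c.toNat < (grid[r.toNat]).length :=
      lt_of_lt_of_le hj (hpre _ (List.getElem_mem hi))
    have hcell : PySem.List.pyGetD (grid[r.toNat]) c 0 = grid[r.toNat][c.toNat] :=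
      PySem.List.pyGetD_eq_getElem _ _ hc0 (by omega)
    rw [hrow, hcell] at hne
    exact hne
  · rintro ⟨i, j, hi, hj, rfl, rfl, hne⟩
    have hlen : j < (grid[i]).length := lt_of_lt_of_le hj (hpre _ (List.getElem_mem hi))
    refine ⟨by positivity, by exact_mod_cast hi, by positivity, by exact_mod_cast hj, ?_⟩
    have hrow : PySem.List.pyGetD grid (i : Int) [] = grid[i] :=
      PySem.List.pyGetD_eq_getElem _ _ (by positivity) (by simpa using hi)
    have hcell : PySem.List.pyGetD (grid[i]) (j : Int) 0 = grid[i][j] :=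
      PySem.List.pyGetD_eq_getElem _ _ (by positivity) (by simpa using hlen)
    rw [hrow, hcell]
    exact hne

-- trim of Source B as a drop/take window around the first/last failing index.
lemma pv_trim_eq {α : Type} (p : List α → Bool) (l : List (List α))
    (h : List.findIdx (fun x => !p x) l < l.length) :
    ((l.dropWhile p).reverse.dropWhile p).reverse =
      (l.drop (List.findIdx (fun x => !p x) l)).take
        (l.length - List.findIdx (fun x => !p x) l - List.findIdx (fun x => !p x) l.reverse) := by
  set q : List α → Bool := fun x => !p x with hq
  set a := List.findIdx q l with hadef
  set b := List.findIdx q l.reverse with hbdef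
  have hqa : q (l[a]'h) = true := List.findIdx_getElem
  have hb : b < l.reverse.length := by
    rw [hbdef]
    exact List.findIdx_lt_length.mpr ⟨l[a]'h, by simp [List.mem_reverse], hqa⟩
  have hb' : b < l.length := by simpa using hb
  have hqb : q (l.reverse[b]'hb) = true := List.findIdx_getElem
  have hrevb : l.reverse[b]'hb = l[l.length - 1 - b]'(by omega) := List.getElem_reverse hb
  have hab : a + b < l.length := by
    by_contra hcon
    have hlt : l.length - 1 - b < a := by omega
    have h2 := List.not_of_lt_findIdx (p := q) (xs := l) hlt
    rw [hrevb] at hqb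
    exact absurd (hqb.symm.trans h2) (by decide)
  have step1 : l.dropWhile p = l.drop a := by
    rw [List.dropWhile_eq_drop_findIdx_not]
  have step2 : (l.drop a).reverse = l.reverse.take (l.length - a) := List.reverse_drop
  have hlen_take : b < (l.reverse.take (l.length - a)).length := by
    rw [List.length_take]; simp; omega
  have step3 : List.findIdx q (l.reverse.take (l.length - a)) = b := by
    rw [List.findIdx_eq hlen_take]
    refine ⟨by rw [List.getElem_take]; exact hqb, fun j hj => ?_⟩
    have := List.not_of_lt_findIdx (p := q) (xs := l.reverse) (by omega : j < b)
    rw [List.getElem_take]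
    exact this
  have step4 : (l.drop a).reverse.dropWhile p = (l.drop a).reverse.drop b := by
    rw [List.dropWhile_eq_drop_findIdx_not, step2, step3, ← step2]
  rw [step1, step4]
  rw [List.drop_reverse, List.reverse_reverse]
  congr 1
  rw [List.length_drop]


-- First/last index failing a predicate: position, value, and that all hits lie between.
lemma pv_edge {α : Type} (q : α → Bool) (l : List α) (h : List.findIdx q l < l.length) :
    List.findIdx q l.reverse < l.length ∧
    List.findIdx q l + List.findIdx q l.reverse < l.length ∧
    q (l[List.findIdx q l]'h) = true ∧
    q (l[l.length - 1 - List.findIdx q l.reverse]'(by omega)) = true ∧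
    (∀ i (hi : i < l.length), q (l[i]'hi) = true →
       List.findIdx q l ≤ i ∧ i ≤ l.length - 1 - List.findIdx q l.reverse) := by
  have hq0 : q (l[List.findIdx q l]'h) = true := List.findIdx_getElem
  have hbr : List.findIdx q l.reverse < l.reverse.length := by
    refine List.findIdx_lt_length.mpr ⟨l[List.findIdx q l]'h, ?_, hq0⟩
    rw [List.mem_reverse]; exact List.getElem_mem _
  have hb : List.findIdx q l.reverse < l.length := by simpa using hbr
  have hqb : q (l[l.length - 1 - List.findIdx q l.reverse]'(by omega)) = true := by
    have := List.findIdx_getElem (p := q) (w := hbr)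
    rw [List.getElem_reverse] at this
    exact this
  have hmono : ∀ i (hi : i < l.length), q (l[i]'hi) = true →
      List.findIdx q l ≤ i ∧ i ≤ l.length - 1 - List.findIdx q l.reverse := by
    intro i hi hqi
    constructor
    · by_contra hlt
      have h2 := List.not_of_lt_findIdx (p := q) (xs := l) (by omega : i < List.findIdx q l)
      exact absurd (hqi.symm.trans h2) (by decide)
    · by_contra hlt
      have hk : l.length - 1 - i < List.findIdx q l.reverse := by omega
      have h2 := List.not_of_lt_findIdx (p := q) (xs := l.reverse)
        (by simpa using hk : l.length - 1 - i < List.findIdx q l.reverse)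
      rw [List.getElem_reverse] at h2
      have he : l.length - 1 - (l.length - 1 - i) = i := by omega
      simp only [he] at h2
      exact absurd (hqi.symm.trans h2) (by decide)
  have hab : List.findIdx q l + List.findIdx q l.reverse < l.length := by
    have := (hmono _ (by omega) hqb).1
    omega
  exact ⟨hb, hab, hq0, hqb, hmono⟩

-- A's four extrema as explicit least/greatest hit coordinates.
lemma pv_min_fst (grid : List (List Int)) (bg m : Int)
    (hm : ∃ c, pvHit grid bg m c) (hmin : ∀ r c, pvHit grid bg r c → m ≤ r) :
    (PySem.List.min? ((invA_nonbg grid bg (grid.length : Int)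
        ((grid.headD []).length : Int)).map (·.1)) (fun x => x)).getD 0 = m := by
  obtain ⟨c0, hc0⟩ := hm
  cases hq : PySem.List.min? ((invA_nonbg grid bg (grid.length : Int)
      ((grid.headD []).length : Int)).map (·.1)) (fun x => x) with
  | none =>
    have := (PySem.List.min?_eq_none_iff _ _).mp hq
    have hmem : (m, c0) ∈ invA_nonbg grid bg (grid.length : Int) ((grid.headD []).length : Int) :=
      (pv_mem_nonbg grid bg (m, c0)).mpr hc0
    have hx := List.mem_map_of_mem (f := fun x : Int × Int => x.1) hmem
    rw [this] at hx
    simp at hx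
  | some v =>
    rw [Option.getD_some]
    obtain ⟨p, hp, rfl⟩ := List.mem_map.mp (PySem.List.min?_mem hq)
    have hhit := (pv_mem_nonbg grid bg p).mp hp
    have h2 := PySem.List.min?_isMin hq m
      (List.mem_map_of_mem ((pv_mem_nonbg grid bg (m, c0)).mpr hc0))
    exact le_antisymm h2 (hmin p.1 p.2 hhit)

lemma pv_max_fst (grid : List (List Int)) (bg m : Int)
    (hm : ∃ c, pvHit grid bg m c) (hmax : ∀ r c, pvHit grid bg r c → r ≤ m) :
    (PySem.List.max? ((invA_nonbg grid bg (grid.length : Int)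
        ((grid.headD []).length : Int)).map (·.1)) (fun x => x)).getD 0 = m := by
  obtain ⟨c0, hc0⟩ := hm
  cases hq : PySem.List.max? ((invA_nonbg grid bg (grid.length : Int)
      ((grid.headD []).length : Int)).map (·.1)) (fun x => x) with
  | none =>
    have := (PySem.List.max?_eq_none_iff _ _).mp hq
    have hmem : (m, c0) ∈ invA_nonbg grid bg (grid.length : Int) ((grid.headD []).length : Int) :=
      (pv_mem_nonbg grid bg (m, c0)).mpr hc0
    have hx := List.mem_map_of_mem (f := fun x : Int × Int => x.1) hmem
    rw [this] at hx
    simp at hx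
  | some v =>
    rw [Option.getD_some]
    obtain ⟨p, hp, rfl⟩ := List.mem_map.mp (PySem.List.max?_mem hq)
    have hhit := (pv_mem_nonbg grid bg p).mp hp
    have h2 := PySem.List.max?_isMax hq m
      (List.mem_map_of_mem ((pv_mem_nonbg grid bg (m, c0)).mpr hc0))
    exact le_antisymm (hmax p.1 p.2 hhit) h2

lemma pv_min_snd (grid : List (List Int)) (bg m : Int)
    (hm : ∃ r, pvHit grid bg r m) (hmin : ∀ r c, pvHit grid bg r c → m ≤ c) :
    (PySem.List.min? ((invA_nonbg grid bg (grid.length : Int)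
        ((grid.headD []).length : Int)).map (·.2)) (fun x => x)).getD 0 = m := by
  obtain ⟨r0, hr0⟩ := hm
  cases hq : PySem.List.min? ((invA_nonbg grid bg (grid.length : Int)
      ((grid.headD []).length : Int)).map (·.2)) (fun x => x) with
  | none =>
    have := (PySem.List.min?_eq_none_iff _ _).mp hq
    have hmem : (r0, m) ∈ invA_nonbg grid bg (grid.length : Int) ((grid.headD []).length : Int) :=
      (pv_mem_nonbg grid bg (r0, m)).mpr hr0
    have hx := List.mem_map_of_mem (f := fun x : Int × Int => x.2) hmem
    rw [this] at hx
    simp at hx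
  | some v =>
    rw [Option.getD_some]
    obtain ⟨p, hp, rfl⟩ := List.mem_map.mp (PySem.List.min?_mem hq)
    have hhit := (pv_mem_nonbg grid bg p).mp hp
    have h2 := PySem.List.min?_isMin hq m
      (List.mem_map_of_mem ((pv_mem_nonbg grid bg (r0, m)).mpr hr0))
    exact le_antisymm h2 (hmin p.1 p.2 hhit)

lemma pv_max_snd (grid : List (List Int)) (bg m : Int)
    (hm : ∃ r, pvHit grid bg r m) (hmax : ∀ r c, pvHit grid bg r c → c ≤ m) :
    (PySem.List.max? ((invA_nonbg grid bg (grid.length : Int)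
        ((grid.headD []).length : Int)).map (·.2)) (fun x => x)).getD 0 = m := by
  obtain ⟨r0, hr0⟩ := hm
  cases hq : PySem.List.max? ((invA_nonbg grid bg (grid.length : Int)
      ((grid.headD []).length : Int)).map (·.2)) (fun x => x) with
  | none =>
    have := (PySem.List.max?_eq_none_iff _ _).mp hq
    have hmem : (r0, m) ∈ invA_nonbg grid bg (grid.length : Int) ((grid.headD []).length : Int) :=
      (pv_mem_nonbg grid bg (r0, m)).mpr hr0
    have hx := List.mem_map_of_mem (f := fun x : Int × Int => x.2) hmem
    rw [this] at hx
    simp at hx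
  | some v =>
    rw [Option.getD_some]
    obtain ⟨p, hp, rfl⟩ := List.mem_map.mp (PySem.List.max?_mem hq)
    have hhit := (pv_mem_nonbg grid bg p).mp hp
    have h2 := PySem.List.max?_isMax hq m
      (List.mem_map_of_mem ((pv_mem_nonbg grid bg (r0, m)).mpr hr0))
    exact le_antisymm (hmax p.1 p.2 hhit) h2

lemma pv_break {α β : Type} (g : β → Option α) (l : List β) (acc : Option α) :
    l.foldl (fun acc x => if acc.isSome then acc else g x) acc = acc.or (l.findSome? g) := by
  induction l generalizing acc with
  | nil => cases acc <;> simp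
  | cons c t ih =>
    cases acc with
    | some v => simp [ih]
    | none =>
      rw [List.foldl_cons]
      simp only [Option.isSome_none, Bool.false_eq_true, if_false, ih, List.findSome?_cons]
      cases g c <;> simp

lemma pv_findSome?_congr {α β : Type} (l : List α) (f g : α → Option β)
    (h : ∀ x ∈ l, f x = g x) : l.findSome? f = l.findSome? g := by
  induction l with
  | nil => rfl
  | cons a t ih =>
    rw [List.findSome?_cons, List.findSome?_cons, h a (by simp)]
    cases g a <;> simp [ih fun x hx => h x (by simp [hx])]

lemma pv_findSome?_flatMap {α β γ : Type} (l : List α) (f : α → List β) (g : β → Option γ) :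
    (l.flatMap f).findSome? g = l.findSome? (fun x => (f x).findSome? g) := by
  induction l with
  | nil => rfl
  | cons a t ih =>
    rw [List.flatMap_cons, List.findSome?_append, List.findSome?_cons, ih]
    cases (f a).findSome? g <;> simp

lemma pv_find?_eq_findSome? {α : Type} (p : α → Bool) (l : List α) :
    l.find? p = l.findSome? (fun v => if p v then some v else none) := by
  induction l with
  | nil => rfl
  | cons a t ih => by_cases h : p a <;> simp [h, ih]

lemma pv_slice_interior {α : Type} (xs : List α) :
    PySem.List.slice xs (some 1) (some (-1)) = (xs.drop 1).take (xs.length - 2) := by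
  cases xs with
  | nil => rfl
  | cons x t =>
    simp [PySem.List.slice, PySem.List.clampIdx]
    rw [if_neg (by omega : ¬((t.length : Int) < 0))]
    omega

lemma pv_swap_getD (border fill v : Int) (hne : fill ≠ border) :
    PySem.Dict.getD
      (PySem.Dict.insert (PySem.Dict.insert PySem.Dict.empty border fill) fill border) v v =
      if v = border then fill else if v = fill then border else v := by
  rw [PySem.Dict.getD_insert, PySem.Dict.getD_insert]
  split_ifs <;> simp_all [PySem.Dict.getD_empty]

lemma pv_window_at {α : Type} (xs : List α) (d : α) (a n : Nat) (h : a + n ≤ xs.length) :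
    (PySem.List.pyRange (a : Int) ((a : Int) + (n : Int)) 1).map (fun j => PySem.List.pyGetD xs j d) =
      (xs.drop a).take n := by
  apply List.ext_getElem
  · simp [PySem.List.length_pyRange_one]; omega
  · intro k h1 h2
    have hk : k < n := by simpa [PySem.List.length_pyRange_one] using h1
    have hax : a + k < xs.length := by omega
    simp only [List.getElem_map, PySem.List.getElem_pyRange_one]
    rw [show (a : Int) + (k : Int) = ((a + k : Nat) : Int) by push_cast; ring]
    rw [PySem.List.pyGetD_natCast]
    rw [List.getElem_take, List.getElem_drop]
    exact List.getD_eq_getElem _ _ hax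

lemma pv_window_interior {α : Type} (xs : List α) (d : α) :
    (PySem.List.pyRange 1 ((xs.length : Int) - 1) 1).map (fun j => PySem.List.pyGetD xs j d) =
      (xs.drop 1).take (xs.length - 2) := by
  rcases Nat.lt_or_ge xs.length 2 with h | h
  · rw [PySem.List.pyRange_one_eq_nil (by omega)]
    simp [show xs.length - 2 = 0 from by omega]
  · have hw := pv_window_at xs d 1 (xs.length - 2) (by omega)
    rw [show (((1 : Nat) : Int)) + ((xs.length - 2 : Nat) : Int) = ((xs.length : Int) - 1) from by omega,
      Nat.cast_one] at hw
    exact hw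

lemma pv_fill_eq (rect : List (List Int)) (border rh rw : Int)
    (hrh : rh = (rect.length : Int)) (hrw : ∀ row ∈ rect, (row.length : Int) = rw) :
    invA_fill rect rh rw border = invB_fill rect border := by
  unfold invA_fill invB_fill
  rw [pv_break, Option.none_or]
  rw [pv_find?_eq_findSome?, pv_findSome?_flatMap, pv_slice_interior]
  rw [show (fun r : Int => (PySem.List.pyRange 1 (rw - 1) 1).foldl
        (fun acc2 c => if acc2.isSome then acc2
          else if PySem.List.pyGetD (PySem.List.pyGetD rect r []) c 0 ≠ border
            then some (PySem.List.pyGetD (PySem.List.pyGetD rect r []) c 0) else none) none)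
      = (fun row : List Int => (PySem.List.pyRange 1 (rw - 1) 1).foldl
        (fun acc2 c => if acc2.isSome then acc2
          else if PySem.List.pyGetD row c 0 ≠ border
            then some (PySem.List.pyGetD row c 0) else none) none) ∘
        (fun r : Int => PySem.List.pyGetD rect r []) from rfl]
  rw [← List.findSome?_map]
  rw [hrh, pv_window_interior]
  apply pv_findSome?_congr
  intro row hrow
  have hrmem : row ∈ rect := List.mem_of_mem_drop (List.mem_of_mem_take hrow)
  rw [pv_break, Option.none_or]
  rw [show (fun c : Int => if PySem.List.pyGetD row c 0 ≠ border
        then some (PySem.List.pyGetD row c 0) else none)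
      = (fun v : Int => if v ≠ border then some v else none) ∘
        (fun c : Int => PySem.List.pyGetD row c 0) from rfl]
  rw [← List.findSome?_map]
  rw [← hrw row hrmem] at *
  rw [pv_window_interior, pv_slice_interior]
  apply pv_findSome?_congr
  intro v _
  by_cases hv : v = border <;> simp [hv]

lemma pv_out_eq (rect : List (List Int)) (border fill rh rw : Int)
    (hrh : rh = (rect.length : Int)) (hrw : ∀ row ∈ rect, (row.length : Int) = rw)
    (hbf : fill ≠ border) :
    invA_out rect rh rw border fill =
      rect.map (fun row => row.map (fun v =>
        PySem.Dict.getD (PySem.Dict.insert (PySem.Dict.insert PySem.Dict.empty border fill)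
          fill border) v v)) := by
  unfold invA_out
  rw [PySem.List.foldl_append_singleton_eq_map, List.nil_append]
  rw [show (fun r : Int => (PySem.List.pyRange 0 rw 1).foldl (fun row c =>
        row ++ [if PySem.List.pyGetD (PySem.List.pyGetD rect r []) c 0 = border then fill
          else if PySem.List.pyGetD (PySem.List.pyGetD rect r []) c 0 = fill then border
          else PySem.List.pyGetD (PySem.List.pyGetD rect r []) c 0]) [])
      = (fun row : List Int => (PySem.List.pyRange 0 rw 1).foldl (fun out c =>
        out ++ [if PySem.List.pyGetD row c 0 = border then fill
          else if PySem.List.pyGetD row c 0 = fill then border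
          else PySem.List.pyGetD row c 0]) [])
        ∘ (fun r : Int => PySem.List.pyGetD rect r []) from rfl]
  rw [← List.map_map]
  rw [hrh, ← PySem.List.len_eq, PySem.List.map_pyGetD_pyRange_zero]
  apply List.map_congr_left
  intro row hrow
  rw [PySem.List.foldl_append_singleton_eq_map, List.nil_append]
  rw [show (fun c : Int => if PySem.List.pyGetD row c 0 = border then fill
        else if PySem.List.pyGetD row c 0 = fill then border
        else PySem.List.pyGetD row c 0)
      = (fun v : Int => if v = border then fill else if v = fill then border else v)
        ∘ (fun c : Int => PySem.List.pyGetD row c 0) from rfl]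
  rw [← List.map_map]
  rw [← hrw row hrow, ← PySem.List.len_eq, PySem.List.map_pyGetD_pyRange_zero]
  apply List.map_congr_left
  intro v _
  rw [pv_swap_getD border fill v hbf]

-- ===== VERDICT (by name: the statement is the Claim_ definition above) =====
set_option maxHeartbeats 2000000 in
theorem invert_bordered_rect_spec : Claim_equal_invert_bordered_rect := by
  intro grid bg _hdom hpre
  unfold Pre_invert_bordered_rect at hpre
  unfold Spec_invert_bordered_rect invert_bordered_rect invert_bordered_rect_alt
  have hw : (if grid.isEmpty then (0 : Int) else ((grid.headD []).length : Int))
      = ((grid.headD []).length : Int) := by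
    cases grid <;> simp
  simp only [PySem.List.len_eq, hw]
  set H := grid.length with hH
  set W := (grid.headD []).length with hW
  set rows := grid.map (fun row => PySem.List.slice row none (some (W : Int))) with hrows
  set N := invA_nonbg grid bg (H : Int) (W : Int) with hN
  -- shape of rows
  have hrowslen : rows.length = H := by simp [hrows, hH]
  have hrowget : ∀ i (hi : i < H), rows[i]'(by omega) = grid[i].take W := by
    intro i hi
    simp only [hrows, List.getElem_map]
    exact PySem.List.slice_to_natCast _ _
  have hrowlen : ∀ i (hi : i < H), (rows[i]'(by omega)).length = W := by
    intro i hi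
    rw [hrowget i hi, List.length_take]
    exact Nat.min_eq_left (hpre _ (List.getElem_mem hi))
  have hrowel : ∀ i (hi : i < H) j (hj : j < W),
      (rows[i]'(by omega))[j]'(by rw [hrowlen i hi]; omega)
        = grid[i][j]'(lt_of_lt_of_le hj (hpre _ (List.getElem_mem hi))) := by
    intro i hi j hj
    have := hrowget i hi
    simp only [this, List.getElem_take]
  -- non-blank rows are exactly rows containing a hit
  have hnbrow : ∀ i (hi : i < H),
      ((!pvBlank bg (rows[i]'(by omega))) = true ↔ ∃ c : Int, pvHit grid bg (i : Int) c) := by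
    intro i hi
    rw [pvBlank]
    constructor
    · intro hx
      rw [Bool.not_eq_eq_eq_not, Bool.not_true, List.all_eq_false] at hx
      obtain ⟨v, hv, hvb⟩ := hx
      obtain ⟨j, hj, rfl⟩ := List.mem_iff_getElem.mp hv
      have hjW : j < W := by rw [hrowlen i hi] at hj; exact hj
      refine ⟨(j : Int), (pv_hit_iff grid bg hpre _ _).mpr ⟨i, j, hi, hjW, rfl, rfl, ?_⟩⟩
      rw [← hrowel i hi j hjW]
      simpa using hvb
    · rintro ⟨c, hc⟩
      obtain ⟨i', j, hi', hj, hii, hcc, hne⟩ := (pv_hit_iff grid bg hpre _ _).mp hc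
      have hieq : i' = i := by exact_mod_cast hii.symm
      subst hieq
      rw [Bool.not_eq_eq_eq_not, Bool.not_true, List.all_eq_false]
      refine ⟨(rows[i']'(by omega))[j]'(by rw [hrowlen i' hi]; omega), ?_, ?_⟩
      · exact List.getElem_mem _
      · rw [hrowel i' hi j hj]; simpa using hne
  by_cases hhits : ∃ r c : Int, pvHit grid bg r c
  · -- there is a non-bg cell: both sides take the main branch
    obtain ⟨r0, c0, hrc0⟩ := hhits
    obtain ⟨i0, j0, hi0, hj0, hre0, hce0, hne0⟩ := (pv_hit_iff grid bg hpre _ _).mp hrc0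
    rw [hre0, hce0] at hrc0
    have hi0H : i0 < H := hi0
    have hj0W : j0 < W := hj0
    set a := List.findIdx (fun x => !pvBlank bg x) rows with hadef
    set b := List.findIdx (fun x => !pvBlank bg x) rows.reverse with hbdef
    have haH' : List.findIdx (fun x => !pvBlank bg x) rows < rows.length := by
      refine List.findIdx_lt_length.mpr ⟨rows[i0]'(by omega), List.getElem_mem _, ?_⟩
      exact (hnbrow i0 hi0H).mpr ⟨(j0 : Int), hrc0⟩
    obtain ⟨hbH', hab', hqa, hqb, hmonoR⟩ := pv_edge (fun x => !pvBlank bg x) rows haH'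
    simp only [← hadef] at haH' hqa hmonoR hab'
    simp only [← hbdef] at hbH' hqb hmonoR hab'
    -- all hit rows lie between a and H - 1 - b
    have rowBound : ∀ r c : Int, pvHit grid bg r c →
        (a : Int) ≤ r ∧ r ≤ ((H - 1 - b : Nat) : Int) := by
      intro r c hc
      obtain ⟨i, j, hi, hj, hre, hce, hne⟩ := (pv_hit_iff grid bg hpre _ _).mp hc
      rw [hre, hce] at hc
      have := hmonoR i (by omega) ((hnbrow i hi).mpr ⟨(j : Int), hc⟩)
      rw [hre]
      refine ⟨?_, ?_⟩
      · exact_mod_cast this.1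
      · rw [hrowslen] at this; exact_mod_cast this.2
    have hita : ∃ c : Int, pvHit grid bg (a : Int) c :=
      (hnbrow a (by omega)).mp hqa
    have hitb : ∃ c : Int, pvHit grid bg ((H - 1 - b : Nat) : Int) c := by
      have heq : rows.length - 1 - b = H - 1 - b := by omega
      simp only [heq] at hqb
      exact (hnbrow (H - 1 - b) (by omega)).mp hqb
    -- the band: rows trimmed of blank edges
    have hband : pvTrim bg rows = (rows.drop a).take (rows.length - a - b) :=
      pv_trim_eq (pvBlank bg) rows haH'
    set band := pvTrim bg rows with hbanddef
    set L := H - a - b with hLdef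
    have hbandlen : band.length = L := by
      rw [hband]; simp; omega
    have hbandget : ∀ r (hr : r < L), band[r]'(by omega) = rows[a + r]'(by omega) := by
      intro r hr
      simp only [hband, List.getElem_take, List.getElem_drop]
    -- the column-major view
    set allCols := (PySem.List.pyRange 0 (W : Int) 1).map (fun c =>
      band.map (fun row => PySem.List.pyGetD row c 0)) with hACdef
    have hACl : allCols.length = W := by
      simp [hACdef, PySem.List.length_pyRange_one]
    have hACget : ∀ c (hc : c < W), allCols[c]'(by omega)
        = band.map (fun row => PySem.List.pyGetD row (c : Int) 0) := by
      intro c hc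
      simp [hACdef, PySem.List.getElem_pyRange_one]
    have hcell : ∀ r (hr : r < L) c (hc : c < W),
        PySem.List.pyGetD (band[r]'(by omega)) (c : Int) 0
          = (grid[a + r]'(by omega))[c]'(lt_of_lt_of_le hc (hpre _ (List.getElem_mem (by omega)))) := by
      intro r hr c hc
      rw [hbandget r hr, PySem.List.pyGetD_natCast,
        List.getD_eq_getElem _ _ (by rw [hrowlen (a + r) (by omega)]; omega), hrowel (a + r) (by omega) c hc]
    have hnbcol : ∀ c (hc : c < W),
        ((!pvBlank bg (allCols[c]'(by omega))) = true ↔ ∃ r : Int, pvHit grid bg r (c : Int)) := by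
      intro c hc
      rw [hACget c hc, pvBlank]
      constructor
      · intro hx
        rw [Bool.not_eq_eq_eq_not, Bool.not_true, List.all_eq_false] at hx
        obtain ⟨v, hv, hvb⟩ := hx
        obtain ⟨row, hrow, rfl⟩ := List.mem_map.mp hv
        obtain ⟨r, hr, rfl⟩ := List.mem_iff_getElem.mp hrow
        have hrL : r < L := by omega
        refine ⟨((a + r : Nat) : Int), (pv_hit_iff grid bg hpre _ _).mpr
          ⟨a + r, c, by omega, hc, rfl, rfl, ?_⟩⟩
        rw [← hcell r hrL c hc]
        simpa using hvb
      · rintro ⟨r, hr⟩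
        obtain ⟨i, j, hi, hj, hre, hce, hne⟩ := (pv_hit_iff grid bg hpre _ _).mp hr
        rw [hre, hce] at hr
        have hjc : j = c := by exact_mod_cast hce.symm
        subst hjc
        have hbounds := hmonoR i (by omega) ((hnbrow i hi).mpr ⟨(j : Int), hr⟩)
        have hiL : i - a < L := by rw [hrowslen] at hbounds; omega
        rw [Bool.not_eq_eq_eq_not, Bool.not_true, List.all_eq_false]
        refine ⟨PySem.List.pyGetD (band[i - a]'(by omega)) (j : Int) 0, List.mem_map_of_mem (List.getElem_mem _), ?_⟩
        have hia : a + (i - a) = i := by omega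
        rw [hcell (i - a) hiL j hj]
        simp only [hia]
        simpa using hne
    set ac := List.findIdx (fun x => !pvBlank bg x) allCols with hacdef
    set bc := List.findIdx (fun x => !pvBlank bg x) allCols.reverse with hbcdef
    have hacW' : List.findIdx (fun x => !pvBlank bg x) allCols < allCols.length := by
      refine List.findIdx_lt_length.mpr ⟨allCols[j0]'(by omega), List.getElem_mem _, ?_⟩
      exact (hnbcol j0 hj0W).mpr ⟨(i0 : Int), hrc0⟩
    obtain ⟨hbcW', habc', hqac, hqbc, hmonoC⟩ := pv_edge (fun x => !pvBlank bg x) allCols hacW'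
    simp only [← hacdef] at hacW' hqac hmonoC habc'
    simp only [← hbcdef] at hbcW' hqbc hmonoC habc'
    have colBound : ∀ r c : Int, pvHit grid bg r c →
        (ac : Int) ≤ c ∧ c ≤ ((W - 1 - bc : Nat) : Int) := by
      intro r c hc
      obtain ⟨i, j, hi, hj, hre, hce, hne⟩ := (pv_hit_iff grid bg hpre _ _).mp hc
      rw [hre, hce] at hc
      have := hmonoC j (by omega) ((hnbcol j hj).mpr ⟨(i : Int), hc⟩)
      rw [hce]
      refine ⟨?_, ?_⟩
      · exact_mod_cast this.1
      · rw [hACl] at this; exact_mod_cast this.2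
    have hitac : ∃ r : Int, pvHit grid bg r (ac : Int) :=
      (hnbcol ac (by omega)).mp hqac
    have hitbc : ∃ r : Int, pvHit grid bg r ((W - 1 - bc : Nat) : Int) := by
      have heq : allCols.length - 1 - bc = W - 1 - bc := by omega
      simp only [heq] at hqbc
      exact (hnbcol (W - 1 - bc) (by omega)).mp hqbc
    have hcols : pvTrim bg allCols = (allCols.drop ac).take (allCols.length - ac - bc) :=
      pv_trim_eq (pvBlank bg) allCols hacW'
    set M := W - ac - bc with hMdef
    have hcolslen : (pvTrim bg allCols).length = M := by
      rw [hcols]; simp; omega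
    have hcolsget : ∀ j (hjM : j < M), (pvTrim bg allCols)[j]'(by omega)
        = allCols[ac + j]'(by omega) := by
      intro j hjM
      simp only [hcols, List.getElem_take, List.getElem_drop]
    -- fold N's extrema
    have hmemN := pv_mem_nonbg grid bg
    rw [← hH, ← hW, ← hN] at hmemN
    have e1 : (PySem.List.min? (N.map (·.1)) (fun x => x)).getD 0 = (a : Int) := by
      rw [hN, hH, hW]
      exact pv_min_fst grid bg _ hita (fun r c h => (rowBound r c h).1)
    have e2 : (PySem.List.max? (N.map (·.1)) (fun x => x)).getD 0 = ((H - 1 - b : Nat) : Int) := by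
      rw [hN, hH, hW]
      exact pv_max_fst grid bg _ hitb (fun r c h => (rowBound r c h).2)
    have e3 : (PySem.List.min? (N.map (·.2)) (fun x => x)).getD 0 = (ac : Int) := by
      rw [hN, hH, hW]
      exact pv_min_snd grid bg _ hitac (fun r c h => (colBound r c h).1)
    have e4 : (PySem.List.max? (N.map (·.2)) (fun x => x)).getD 0 = ((W - 1 - bc : Nat) : Int) := by
      rw [hN, hH, hW]
      exact pv_max_snd grid bg _ hitbc (fun r c h => (colBound r c h).2)
    -- both branches are the non-empty one
    have hNne : ¬ N.isEmpty = true := by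
      rw [List.isEmpty_iff]
      intro hnil
      have := (hmemN ((i0 : Int), (j0 : Int))).mpr hrc0
      simp [hnil] at this
    have hBne : ¬ band.isEmpty = true := by
      rw [List.isEmpty_iff, ← List.length_eq_zero_iff, hbandlen]
      omega
    rw [if_neg hNne, if_neg hBne, e1, e2, e3, e4]
    -- cast the rectangle dimensions
    have eh : ((H - 1 - b : Nat) : Int) - (a : Int) + 1 = (L : Int) := by omega
    have ew : ((W - 1 - bc : Nat) : Int) - (ac : Int) + 1 = (M : Int) := by omega
    rw [eh, ew]
    -- the two rectangles coincide
    have hacMW : ac + M ≤ W := by omega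
    have hrectAB : invA_rect grid (a : Int) (ac : Int) (L : Int) (M : Int)
        = (PySem.List.pyRange 0 ((band.length : Nat) : Int) 1).map (fun r =>
            (pvTrim bg allCols).map (fun col => PySem.List.pyGetD col r 0)) := by
      apply List.ext_getElem
      · simp [invA_rect, PySem.List.length_pyRange_one, hbandlen]
      · intro i h1 h2
        have hiL : i < L := by
          simpa [invA_rect, PySem.List.length_pyRange_one] using h1
        have haiH : a + i < H := by omega
        simp only [invA_rect, List.getElem_map, PySem.List.getElem_pyRange_one, zero_add]
        have hg : PySem.List.pyGetD grid ((a : Int) + (i : Int)) []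
            = grid[a + i]'(by omega) := by
          rw [show (a : Int) + (i : Int) = ((a + i : Nat) : Int) by push_cast; ring,
            PySem.List.pyGetD_natCast]
          exact List.getD_eq_getElem _ _ (by omega)
        rw [hg, show ((ac : Int) + (M : Int)) = (((ac : Nat) : Int) + ((M : Nat) : Int)) from rfl,
          PySem.List.slice_natCast_add]
        apply List.ext_getElem
        · have hlrow : W ≤ (grid[a + i]'(by omega)).length := hpre _ (List.getElem_mem (by omega))
          simp [hcolslen]
          omega
        · intro j h3 h4
          have hjM : j < M := by simpa [hcolslen] using h4
          simp only [List.getElem_take, List.getElem_drop, List.getElem_map]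
          rw [hcolsget j hjM, hACget (ac + j) (by omega), PySem.List.pyGetD_natCast,
            List.getD_eq_getElem _ _ (by simp [hbandlen]; omega), List.getElem_map]
          rw [hcell i hiL (ac + j) (by omega)]
    rw [hrectAB]
    -- identical fill search and output construction
    set rect := (PySem.List.pyRange 0 ((band.length : Nat) : Int) 1).map (fun r =>
      (pvTrim bg allCols).map (fun col => PySem.List.pyGetD col r 0)) with hrectdef
    have hsh1 : (L : Int) = (rect.length : Int) := by
      simp [hrectdef, PySem.List.length_pyRange_one, hbandlen]
    have hsh2 : ∀ row ∈ rect, ((row.length : Nat) : Int) = (M : Int) := by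
      intro row hrow
      obtain ⟨r, hr, rfl⟩ := List.mem_map.mp hrow
      simp [hcolslen]
    rw [pv_fill_eq rect _ (L : Int) (M : Int) hsh1 hsh2]
    cases hf : invB_fill rect (PySem.List.pyGetD (PySem.List.pyGetD rect 0 []) 0 0) with
    | none => rfl
    | some fill =>
      have hbf : fill ≠ PySem.List.pyGetD (PySem.List.pyGetD rect 0 []) 0 0 := by
        have := List.find?_some (by rw [← hf]; rfl)
        simpa using this
      simp only []
      rw [pv_out_eq rect _ fill (L : Int) (M : Int) hsh1 hsh2 hbf]
  · -- no non-bg cell: both sides return none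
    have hNnil : N = [] := by
      rw [List.eq_nil_iff_forall_not_mem]
      intro x hx
      exact hhits ⟨x.1, x.2, (pv_mem_nonbg grid bg x).mp hx⟩
    have hblank : ∀ x ∈ rows, pvBlank bg x = true := by
      intro x hx
      obtain ⟨i, hi, rfl⟩ := List.mem_iff_getElem.mp hx
      have hiH : i < H := by rw [hrowslen] at hi; exact hi
      by_contra hbx
      exact hhits ⟨(i : Int), (hnbrow i hiH).mp (by simpa using hbx)⟩
    have hband : pvTrim bg rows = [] := by
      unfold pvTrim
      rw [List.dropWhile_eq_nil_iff.mpr hblank]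
      simp
    rw [if_pos (by simp [hNnil]), if_pos (by simp [hband])]
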